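-- pv_equiv track=rewrite | github.com/parktoolfan/space-blimp | Sche_2.py | max_blimp_in_range
-- ===== SOURCE A (Python) =====
-- def max_blimp_in_range(data, time, point):
--     data_in_range = []
--     for row in data:
--         if abs(row[3] - point[0]) <= 5 and abs(row[4] - point[1]) <= 5 and time == row[2]:
--             data_in_range.append(row)
--         else:
--             pass
--     max_blimp = max(data_in_range, key=lambda i: i[1])
--     return max_blimp
-- ===== SOURCE B (Python) =====
-- def max_blimp_in_range(data, time, point):
--     best = None
--     best_key = 0
--     for row in data:
--         if abs(row[3] - point[0]) <= 5 and abs(row[4] - point[1]) <= 5 and time == row[2]: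
--             k = row[1]
--             if best is None or k > best_key:
--                 best = row
--                 best_key = k
--     if best is None:
--         raise ValueError("max() arg is an empty sequence")
--     return best
-- ===== Notes on version B (the rewrite author's own statement) =====
-- stated objective: alternative
-- what changed: Replaces A's build-a-filtered-list-then-max(key=...) two-phase structure with a single pass that keeps a running best row and its key, never materialising the intermediate list.
import Mathlib
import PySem

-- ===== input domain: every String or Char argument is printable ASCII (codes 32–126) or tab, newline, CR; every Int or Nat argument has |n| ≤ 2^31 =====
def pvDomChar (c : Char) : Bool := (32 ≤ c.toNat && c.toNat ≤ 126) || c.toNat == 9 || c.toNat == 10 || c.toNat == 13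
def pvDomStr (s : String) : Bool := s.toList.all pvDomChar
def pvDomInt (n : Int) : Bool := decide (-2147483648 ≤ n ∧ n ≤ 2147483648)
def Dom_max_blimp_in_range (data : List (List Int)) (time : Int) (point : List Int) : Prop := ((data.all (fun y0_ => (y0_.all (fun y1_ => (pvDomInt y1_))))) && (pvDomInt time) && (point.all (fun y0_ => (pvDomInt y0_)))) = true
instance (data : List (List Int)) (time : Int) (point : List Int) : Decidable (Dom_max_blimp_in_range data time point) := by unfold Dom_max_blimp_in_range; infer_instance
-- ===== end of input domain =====

-- B replaces A's build-a-filtered-list-then-max(key) two-phase structure by a single pass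
-- keeping a running best row and its key; same return value wherever A returns.

-- ===== PORT A =====
-- the filter condition of A's loop (row[3],row[4],row[2],point[0],point[1] are in range on Pre_)
def pvCondA (time : Int) (point : List Int) (row : List Int) : Bool :=
  decide (|PySem.List.pyGetD row 3 0 - PySem.List.pyGetD point 0 0| ≤ 5) &&
  decide (|PySem.List.pyGetD row 4 0 - PySem.List.pyGetD point 1 0| ≤ 5) &&
  decide (time = PySem.List.pyGetD row 2 0)

def max_blimp_in_range (data : List (List Int)) (time : Int) (point : List Int) : List Int :=
  let data_in_range :=
    data.foldl (fun acc row => if pvCondA time point row then acc ++ [row] else acc) []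
  (PySem.List.max? data_in_range (fun i => PySem.List.pyGetD i 1 0)).getD []

-- ===== PORT B =====
-- single pass: best row so far together with its key (none = no qualifying row yet)
def pvAltLoop (time : Int) (point : List Int) :
    List (List Int) → Option (List Int × Int) → Option (List Int × Int)
  | [], best => best
  | row :: rest, best =>
      if decide (|PySem.List.pyGetD row 3 0 - PySem.List.pyGetD point 0 0| ≤ 5) &&
         decide (|PySem.List.pyGetD row 4 0 - PySem.List.pyGetD point 1 0| ≤ 5) &&
         decide (time = PySem.List.pyGetD row 2 0) then
        let k := PySem.List.pyGetD row 1 0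
        match best with
        | none => pvAltLoop time point rest (some (row, k))
        | some (_, bk) =>
            if bk < k then pvAltLoop time point rest (some (row, k))
            else pvAltLoop time point rest best
      else pvAltLoop time point rest best

def max_blimp_in_range_alt (data : List (List Int)) (time : Int) (point : List Int) : List Int :=
  match pvAltLoop time point data none with
  | none => []          -- Source B raises ValueError here; outside Pre_
  | some (row, _) => row

-- ===== PRECONDITION & SPEC =====
-- Exactly the inputs on which Python A returns normally: every row is long enough for the
-- indexing its (short-circuited) test performs, point has two coordinates, and at least one
-- row qualifies (otherwise max([]) raises ValueError).
def Pre_max_blimp_in_range (data : List (List Int)) (time : Int) (point : List Int) : Prop :=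
  2 ≤ point.length ∧
  (∀ row ∈ data, 4 ≤ row.length ∧
      (|PySem.List.pyGetD row 3 0 - PySem.List.pyGetD point 0 0| ≤ 5 → 5 ≤ row.length)) ∧
  (∃ row ∈ data, |PySem.List.pyGetD row 3 0 - PySem.List.pyGetD point 0 0| ≤ 5 ∧
      |PySem.List.pyGetD row 4 0 - PySem.List.pyGetD point 1 0| ≤ 5 ∧ time = PySem.List.pyGetD row 2 0)
instance (data : List (List Int)) (time : Int) (point : List Int) : Decidable (Pre_max_blimp_in_range data time point) := by unfold Pre_max_blimp_in_range; infer_instance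

def pvWitness_max_blimp_in_range : List (List Int) × Int × List Int :=
  ([[1, 9, 7, 3, 4], [2, 6, 7, 2, 2]], 7, [0, 0])

def Spec_max_blimp_in_range (data : List (List Int)) (time : Int) (point : List Int) (out : List Int) : Prop := out = max_blimp_in_range_alt data time point
instance (data : List (List Int)) (time : Int) (point : List Int) (out : List Int) : Decidable (Spec_max_blimp_in_range data time point out) := by unfold Spec_max_blimp_in_range; infer_instance

-- ===== CLAIM (what is proved, stated in full; the proofs are below) =====
def Claim_equal_max_blimp_in_range : Prop := ∀ (data : List (List Int)) (time : Int) (point : List Int), Dom_max_blimp_in_range data time point → Pre_max_blimp_in_range data time point → Spec_max_blimp_in_range data time point (max_blimp_in_range data time point)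

-- ===== LEMMAS AND PROOFS =====

-- the step max? performs, on an optional best row
def pvStep (m : Option (List Int)) (x : List Int) : Option (List Int) :=
  match m with
  | none => some x
  | some b => if PySem.List.pyGetD b 1 0 < PySem.List.pyGetD x 1 0 then some x else some b

-- A's filter-then-max fuses into one fold over data
lemma pvA_fused (time : Int) (point : List Int) :
    ∀ (data : List (List Int)) (acc : List (List Int)),
    PySem.List.max?
      (data.foldl (fun acc row => if pvCondA time point row then acc ++ [row] else acc) acc)
      (fun i => PySem.List.pyGetD i 1 0) =
    data.foldl (fun m row => if pvCondA time point row then pvStep m row else m)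
      (PySem.List.max? acc (fun i => PySem.List.pyGetD i 1 0)) := by
  intro data
  induction data with
  | nil => intro acc; rfl
  | cons row rest ih =>
      intro acc
      by_cases h : pvCondA time point row = true
      · simp only [List.foldl_cons, h, if_true, ih]
        congr 1
        simp only [PySem.List.max?, List.foldl_append, List.foldl_cons, List.foldl_nil, pvStep]
        split
        next hz => rw [hz]
        next m hz => rw [hz]
      · simp only [Bool.not_eq_true] at h
        simp only [List.foldl_cons, h, Bool.false_eq_true, if_false, ih]

-- B's loop is the same fused fold, carrying the key alongside
lemma pvB_fused (time : Int) (point : List Int) :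
    ∀ (data : List (List Int)) (m : Option (List Int)),
    pvAltLoop time point data (m.map (fun r => (r, PySem.List.pyGetD r 1 0))) =
    (data.foldl (fun m row => if pvCondA time point row then pvStep m row else m) m).map
      (fun r => (r, PySem.List.pyGetD r 1 0)) := by
  intro data
  induction data with
  | nil => intro m; rfl
  | cons row rest ih =>
      intro m
      have hc : (decide (|PySem.List.pyGetD row 3 0 - PySem.List.pyGetD point 0 0| ≤ 5) &&
          decide (|PySem.List.pyGetD row 4 0 - PySem.List.pyGetD point 1 0| ≤ 5) &&
          decide (time = PySem.List.pyGetD row 2 0)) = pvCondA time point row := rfl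
      cases m with
      | none =>
          simp only [Option.map_none, pvAltLoop, hc, List.foldl_cons]
          by_cases h : pvCondA time point row = true
          · simp only [h, if_true]
            exact ih (some row)
          · simp only [Bool.not_eq_true] at h
            simp only [h, Bool.false_eq_true, if_false]
            exact ih none
      | some b =>
          simp only [Option.map_some, pvAltLoop, hc, List.foldl_cons]
          by_cases h : pvCondA time point row = true
          · simp only [h, if_true, pvStep]
            by_cases hlt : PySem.List.pyGetD b 1 0 < PySem.List.pyGetD row 1 0
            · simp only [if_pos hlt]
              exact ih (some row)
            · simp only [if_neg hlt]
              exact ih (some b)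
          · simp only [Bool.not_eq_true] at h
            simp only [h, Bool.false_eq_true, if_false]
            exact ih (some b)

-- ===== VERDICT (by name: the statement is the Claim_ definition above) =====
theorem max_blimp_in_range_spec : Claim_equal_max_blimp_in_range := by
  intro data time point _ _
  unfold Spec_max_blimp_in_range max_blimp_in_range max_blimp_in_range_alt
  have hA := pvA_fused time point data []
  have hB := pvB_fused time point data none
  have h0 : PySem.List.max? ([] : List (List Int)) (fun i => PySem.List.pyGetD i 1 0) = none := rfl
  rw [h0] at hA
  simp only [Option.map_none] at hB
  show (PySem.List.max?
      (List.foldl (fun acc row => if pvCondA time point row then acc ++ [row] else acc) [] data)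
      (fun i => PySem.List.pyGetD i 1 0)).getD [] =
    match pvAltLoop time point data none with
    | none => []
    | some (row, _) => row
  rw [hA, hB]
  cases List.foldl (fun m row => if pvCondA time point row then pvStep m row else m) none data with
  | none => rfl
  | some r => rfl
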